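-- pv_equiv track=rewrite | github.com/cristiano-nicolau/IA | guiao-de-programacao-funcional-cristiano-nicolau/aula1.py | max_min_restantes
-- ===== SOURCE A (Python) =====
-- def max_min_restantes(lista):
-- 	if lista == []: return None
--
-- 	if len(lista) == 1:
-- 		return lista[0], lista[0], []
--
-- 	M, m, resto = max_min_restantes(lista[1:])
--
-- 	if lista[0] < m:
-- 		return  M, lista[0], resto
--
-- 	if lista[0] > M:
-- 		return  lista[0], m, resto
--
-- 	return M, m, [lista[0]] + resto
-- ===== SOURCE B (Python) =====
-- def max_min_restantes(lista):
--     if not lista: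
--         return None
--     M = m = lista[-1]
--     resto = []
--     for x in lista[-2::-1]:
--         if x < m:
--             m = x
--         elif x > M:
--             M = x
--         else:
--             resto.append(x)
--     resto.reverse()
--     return M, m, resto
-- ===== Notes on version B (the rewrite author's own statement) =====
-- stated objective: faster
-- what changed: Replaces the recursion that copies the tail with lista[1:] at every level by a single right-to-left loop maintaining the running suffix max/min and collecting the in-range elements, reversing the collected list once at the end.
import Mathlib
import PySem

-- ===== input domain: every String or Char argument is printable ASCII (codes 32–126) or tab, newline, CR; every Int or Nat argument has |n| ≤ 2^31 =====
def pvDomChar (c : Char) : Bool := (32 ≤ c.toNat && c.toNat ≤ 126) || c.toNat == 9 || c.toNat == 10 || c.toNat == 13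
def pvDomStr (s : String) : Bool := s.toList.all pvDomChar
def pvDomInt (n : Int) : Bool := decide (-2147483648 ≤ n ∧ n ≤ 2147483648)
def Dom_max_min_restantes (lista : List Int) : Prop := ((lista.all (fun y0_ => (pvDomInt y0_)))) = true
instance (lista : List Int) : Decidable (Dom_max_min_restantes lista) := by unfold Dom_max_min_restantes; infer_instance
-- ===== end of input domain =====

-- B replaces A's tail-copying recursion by one right-to-left pass with running suffix max/min (faster; return value only, no side effects).

-- ===== PORT A =====
-- literal port of A: recursion on the tail (lista[1:]); Python's None-unpacking branch is
-- unreachable since the recursive call is only made on a nonempty tail.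
def max_min_restantes : List Int → Option (Int × Int × List Int)
  | [] => none
  | [x] => some (x, x, [])
  | x :: y :: rest =>
    match max_min_restantes (y :: rest) with
    | none => none
    | some (M, m, resto) =>
      if x < m then some (M, x, resto)
      else if x > M then some (x, m, resto)
      else some (M, m, x :: resto)

-- ===== PORT B =====
-- literal port of B: seed with the last element, loop over lista[-2::-1] (= tail of the
-- reversed list); B's append-then-final-reverse is rendered as consing to the front,
-- which yields the identical list.
def max_min_restantes_alt (lista : List Int) : Option (Int × Int × List Int) :=
  match lista.reverse with
  | [] => none
  | last :: front =>
    some (front.foldl (fun s x =>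
      if x < s.2.1 then (s.1, x, s.2.2)
      else if x > s.1 then (x, s.2.1, s.2.2)
      else (s.1, s.2.1, x :: s.2.2)) (last, last, ([] : List Int)))

-- ===== PRECONDITION & SPEC =====
def Spec_max_min_restantes (lista : List Int) (out : Option (Int × Int × List Int)) : Prop := out = max_min_restantes_alt lista
instance (lista : List Int) (out : Option (Int × Int × List Int)) : Decidable (Spec_max_min_restantes lista out) := by unfold Spec_max_min_restantes; infer_instance

-- ===== CLAIM (what is proved, stated in full; the proofs are below) =====
def Claim_equal_max_min_restantes : Prop := ∀ (lista : List Int), Dom_max_min_restantes lista → Spec_max_min_restantes lista (max_min_restantes lista)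

-- ===== LEMMAS AND PROOFS =====

-- B's one step, applied to A's recursive result: peeling the head off a nonempty-tail list
-- is the same as folding one more element after the reversed tail.
theorem alt_cons (x y : Int) (l : List Int) :
    max_min_restantes_alt (x :: y :: l) =
      (max_min_restantes_alt (y :: l)).map (fun s =>
        if x < s.2.1 then (s.1, x, s.2.2)
        else if x > s.1 then (x, s.2.1, s.2.2)
        else (s.1, s.2.1, x :: s.2.2)) := by
  have hne : (y :: l).reverse ≠ [] := by simp
  rcases hrev : (y :: l).reverse with _ | ⟨a, bs⟩
  · exact absurd hrev hne
  · have : (x :: y :: l).reverse = a :: (bs ++ [x]) := by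
      simp [List.reverse_cons, hrev]
    simp [max_min_restantes_alt, this, hrev, List.foldl_append]

theorem mmr_eq (l : List Int) : max_min_restantes l = max_min_restantes_alt l := by
  induction l with
  | nil => rfl
  | cons x t ih =>
    cases t with
    | nil => simp [max_min_restantes, max_min_restantes_alt]
    | cons y rest =>
      rw [alt_cons, ← ih]
      rcases h : max_min_restantes (y :: rest) with _ | ⟨M, m, resto⟩
      · simp [max_min_restantes, h]
      · simp only [max_min_restantes, h, Option.map_some]
        split_ifs <;> rfl

-- ===== VERDICT (by name: the statement is the Claim_ definition above) =====
theorem max_min_restantes_spec : Claim_equal_max_min_restantes := by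
  intro lista _
  exact mmr_eq lista
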